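-- pv_equiv track=rewrite | github.com/kenstott/constat | constat/discovery/models.py | extract_resource_from_path
-- ===== SOURCE A (Python) =====
-- def extract_resource_from_path(path: str) -> str:
--     """Extract the primary resource name from an API path.
--
--     Extracts the last meaningful path segment, ignoring path parameters.
--
--     Args:
--         path: API path (e.g., "/breeds", "/users/{id}/orders", "/api/v1/products")
--
--     Returns:
--         Resource name (e.g., "breeds", "orders", "products")
--     """
--     # Split path into segments
--     segments = [s for s in path.split('/') if s]
--
--     # Filter out path parameters ({id}, {userId}, etc.) and common prefixes
--     ignore_patterns = {'api', 'v1', 'v2', 'v3'}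
--     meaningful_segments = []
--
--     for segment in segments:
--         # Skip path parameters
--         if segment.startswith('{') and segment.endswith('}'):
--             continue
--         # Skip common API prefixes
--         if segment.lower() in ignore_patterns:
--             continue
--         meaningful_segments.append(segment)
--
--     if not meaningful_segments:
--         # Fallback to last segment even if it's a parameter
--         return segments[-1] if segments else path
--
--     # Return the last meaningful segment (the primary resource)
--     return meaningful_segments[-1]
-- ===== SOURCE B (Python) =====
-- def extract_resource_from_path(path: str) -> str:
--     """Extract the primary resource name from an API path.
--
--     Scans the segments from the end and returns the first one that is not a
--     {param} and not a common API prefix; no intermediate list is built.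
--     """
--     segments = [s for s in path.split('/') if s]
--     ignore_patterns = {'api', 'v1', 'v2', 'v3'}
--     for segment in reversed(segments):
--         if segment.startswith('{') and segment.endswith('}'):
--             continue
--         if segment.lower() in ignore_patterns:
--             continue
--         return segment
--     # Fallback: everything filtered out (or no segments at all)
--     return segments[-1] if segments else path
-- ===== Notes on version B (the rewrite author's own statement) =====
-- stated objective: simpler
-- what changed: B scans the segments in reverse and returns the first non-parameter, non-prefix segment immediately, instead of building a list of survivors in a forward pass and taking its last element.
import Mathlib
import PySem

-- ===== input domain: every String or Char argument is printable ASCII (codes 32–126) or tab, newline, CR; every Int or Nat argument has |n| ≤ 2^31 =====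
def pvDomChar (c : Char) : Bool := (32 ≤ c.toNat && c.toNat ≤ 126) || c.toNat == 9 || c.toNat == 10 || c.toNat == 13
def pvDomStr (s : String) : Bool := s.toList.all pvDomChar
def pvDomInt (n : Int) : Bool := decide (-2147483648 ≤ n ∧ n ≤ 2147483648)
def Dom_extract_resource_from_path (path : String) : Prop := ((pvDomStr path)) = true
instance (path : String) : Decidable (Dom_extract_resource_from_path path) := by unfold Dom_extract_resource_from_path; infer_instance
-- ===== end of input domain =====

-- B scans the segments in reverse and returns the first meaningful one, instead of
-- building a forward list of survivors and taking its last element (objective: simpler).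


-- ===== PORT A =====
def extract_resource_from_path (path : String) : String :=
  let segments := ((PySem.Str.split? path "/").getD []).filter (fun s => s ≠ "")
  let meaningful := segments.foldl (fun acc segment =>
    if PySem.Str.startswith segment "{" && PySem.Str.endswith segment "}" then acc
    else if PySem.Str.lower segment ∈ (["api", "v1", "v2", "v3"] : List String) then acc
    else acc ++ [segment]) []
  if meaningful = [] then
    if segments = [] then path else PySem.List.pyGetD segments (-1) path
  else
    PySem.List.pyGetD meaningful (-1) path

-- ===== PORT B =====
-- the reversed-loop of Source B: first segment that survives both skip tests
def pvRevFind : List String → Option String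
  | [] => none
  | segment :: rest =>
    if PySem.Str.startswith segment "{" && PySem.Str.endswith segment "}" then pvRevFind rest
    else if PySem.Str.lower segment ∈ (["api", "v1", "v2", "v3"] : List String) then pvRevFind rest
    else some segment

def extract_resource_from_path_alt (path : String) : String :=
  let segments := ((PySem.Str.split? path "/").getD []).filter (fun s => s ≠ "")
  match pvRevFind segments.reverse with
  | some segment => segment
  | none => if segments = [] then path else PySem.List.pyGetD segments (-1) path

-- ===== PRECONDITION & SPEC =====
def Spec_extract_resource_from_path (path : String) (out : String) : Prop := out = extract_resource_from_path_alt path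
instance (path : String) (out : String) : Decidable (Spec_extract_resource_from_path path out) := by unfold Spec_extract_resource_from_path; infer_instance

-- ===== CLAIM (what is proved, stated in full; the proofs are below) =====
def Claim_equal_extract_resource_from_path : Prop := ∀ (path : String), Dom_extract_resource_from_path path → Spec_extract_resource_from_path path (extract_resource_from_path path)

-- ===== LEMMAS AND PROOFS =====

-- A segment is kept iff it is not a {param} and not an ignored prefix
def pvKeep (segment : String) : Bool :=
  !(PySem.Str.startswith segment "{" && PySem.Str.endswith segment "}") &&
  !(decide (PySem.Str.lower segment ∈ (["api", "v1", "v2", "v3"] : List String)))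

lemma pvFoldl_eq_filter (xs : List String) (acc : List String) :
    xs.foldl (fun acc segment =>
      if PySem.Str.startswith segment "{" && PySem.Str.endswith segment "}" then acc
      else if PySem.Str.lower segment ∈ (["api", "v1", "v2", "v3"] : List String) then acc
      else acc ++ [segment]) acc = acc ++ xs.filter pvKeep := by
  induction xs generalizing acc with
  | nil => simp
  | cons x xs ih =>
    simp only [List.foldl_cons, List.filter_cons, pvKeep]
    cases h1a : PySem.Chars.startswith x.toList ['{'] <;>
      cases h1b : PySem.Chars.endswith x.toList ['}'] <;>
      by_cases h2 : PySem.Str.lower x ∈ (["api", "v1", "v2", "v3"] : List String) <;>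
      simp_all

lemma pvRevFind_eq_find? (xs : List String) : pvRevFind xs = xs.find? pvKeep := by
  induction xs with
  | nil => rfl
  | cons x xs ih =>
    simp only [pvRevFind, List.find?, pvKeep]
    cases h1a : PySem.Chars.startswith x.toList ['{'] <;>
      cases h1b : PySem.Chars.endswith x.toList ['}'] <;>
      by_cases h2 : PySem.Str.lower x ∈ (["api", "v1", "v2", "v3"] : List String) <;>
      simp_all

-- ===== VERDICT (by name: the statement is the Claim_ definition above) =====
theorem extract_resource_from_path_spec : Claim_equal_extract_resource_from_path := by
  intro path _
  unfold Spec_extract_resource_from_path extract_resource_from_path extract_resource_from_path_alt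
  set segments := ((PySem.Str.split? path "/").getD []).filter (fun s => s ≠ "") with hseg
  simp only [pvFoldl_eq_filter, List.nil_append, pvRevFind_eq_find?,
    ← List.head?_filter, List.filter_reverse, List.head?_reverse]
  cases hm : segments.filter pvKeep with
  | nil => rfl
  | cons y ys =>
    rw [if_neg (by simp), PySem.List.pyGetD_neg_one (y :: ys) path (by simp),
      List.getLast?_eq_some_getLast (by simp)]
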